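-- pv_equiv track=rewrite | github.com/arster214/work | src/planner_benchmark/scripts/passive_data_collection.py | infer_group_name
-- ===== SOURCE A (Python) =====
-- def infer_group_name(joint_names):
--     if not joint_names:
--         return ""
--
--     left_count = sum(1 for name in joint_names if isinstance(name, str) and name.startswith('l_'))
--     right_count = sum(1 for name in joint_names if isinstance(name, str) and name.startswith('r_'))
--
--     if left_count > 0 and right_count > 0:
--         return "dual_arms"
--     if right_count > 0:
--         return "r_arm"
--     if left_count > 0:
--         return "l_arm"
--     return ""
-- ===== SOURCE B (Python) =====
-- def infer_group_name(joint_names):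
--     has_left = has_right = False
--     for name in joint_names:
--         if isinstance(name, str):
--             if name.startswith('l_'):
--                 has_left = True
--             elif name.startswith('r_'):
--                 has_right = True
--         if has_left and has_right:
--             break
--     if has_left and has_right:
--         return "dual_arms"
--     if has_right:
--         return "r_arm"
--     if has_left:
--         return "l_arm"
--     return ""
-- ===== Notes on version B (the rewrite author's own statement) =====
-- stated objective: alternative
-- what changed: Replaces A's two separate counting comprehensions with one single-pass loop maintaining two existence booleans and breaking out as soon as both prefixes have been seen.
import Mathlib
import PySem

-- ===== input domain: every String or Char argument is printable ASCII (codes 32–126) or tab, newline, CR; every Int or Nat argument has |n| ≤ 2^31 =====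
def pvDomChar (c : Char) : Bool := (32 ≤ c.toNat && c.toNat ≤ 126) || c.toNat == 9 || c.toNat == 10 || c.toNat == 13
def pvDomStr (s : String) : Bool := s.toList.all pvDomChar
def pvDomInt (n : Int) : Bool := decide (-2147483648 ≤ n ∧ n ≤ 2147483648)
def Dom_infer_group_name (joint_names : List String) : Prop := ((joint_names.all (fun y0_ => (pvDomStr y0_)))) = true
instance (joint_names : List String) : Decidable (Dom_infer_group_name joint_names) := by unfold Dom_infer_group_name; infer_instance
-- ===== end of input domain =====

-- B replaces A's two counting passes with one early-exit loop over two booleans; same return value.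
-- ===== PORT A =====
-- literal transliteration of A: empty guard, then two generator-sum counting passes
-- (isinstance(name, str) is always true on List String and is dropped)
def infer_group_name (joint_names : List String) : String :=
  if joint_names = [] then ""
  else
    let left_count : Int := joint_names.foldl (fun acc name => if PySem.Str.startswith name "l_" then acc + 1 else acc) 0
    let right_count : Int := joint_names.foldl (fun acc name => if PySem.Str.startswith name "r_" then acc + 1 else acc) 0
    if left_count > 0 ∧ right_count > 0 then "dual_arms"
    else if right_count > 0 then "r_arm"
    else if left_count > 0 then "l_arm"
    else ""

-- ===== PORT B =====
-- the for-loop of Source B with its break: recursion carrying (has_left, has_right)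
def inferGroupLoop : List String → Bool → Bool → Bool × Bool
  | [], hl, hr => (hl, hr)
  | name :: rest, hl, hr =>
    let hl := if PySem.Str.startswith name "l_" then true else hl
    let hr := if !PySem.Str.startswith name "l_" && PySem.Str.startswith name "r_" then true else hr
    if hl && hr then (hl, hr) else inferGroupLoop rest hl hr

def infer_group_name_alt (joint_names : List String) : String :=
  let p := inferGroupLoop joint_names false false
  if p.1 && p.2 then "dual_arms"
  else if p.2 then "r_arm"
  else if p.1 then "l_arm"
  else ""

-- ===== PRECONDITION & SPEC =====
def Spec_infer_group_name (joint_names : List String) (out : String) : Prop := out = infer_group_name_alt joint_names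
instance (joint_names : List String) (out : String) : Decidable (Spec_infer_group_name joint_names out) := by unfold Spec_infer_group_name; infer_instance

-- ===== CLAIM (what is proved, stated in full; the proofs are below) =====
def Claim_equal_infer_group_name : Prop := ∀ (joint_names : List String), Dom_infer_group_name joint_names → Spec_infer_group_name joint_names (infer_group_name joint_names)

-- ===== LEMMAS AND PROOFS =====

-- a string cannot start with both 'l_' and 'r_'
lemma not_l_and_r (s : String) :
    ¬(PySem.Str.startswith s "l_" = true ∧ PySem.Str.startswith s "r_" = true) := by
  rintro ⟨h1, h2⟩
  simp only [PySem.Str.startswith_eq] at h1 h2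
  rw [PySem.Chars.startswith_iff] at h1 h2
  rcases h1 with ⟨t1, e1⟩
  rcases h2 with ⟨t2, e2⟩
  rw [← e1] at e2
  simp at e2

-- the early-exit loop computes exactly the two existence flags
lemma inferGroupLoop_eq (xs : List String) : ∀ hl hr : Bool,
    inferGroupLoop xs hl hr =
      (hl || xs.any (fun n => PySem.Str.startswith n "l_"),
       hr || xs.any (fun n => PySem.Str.startswith n "r_")) := by
  induction xs with
  | nil => intro hl hr; simp [inferGroupLoop]
  | cons name rest ih =>
    intro hl hr
    simp only [inferGroupLoop, List.any_cons]
    rw [ih]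
    by_cases hL : PySem.Str.startswith name "l_"
    · have hR : PySem.Str.startswith name "r_" = false := by
        by_contra h
        exact not_l_and_r name ⟨hL, by simpa using h⟩
      cases hl <;> cases hr <;> simp_all
    · by_cases hR : PySem.Str.startswith name "r_" <;> cases hl <;> cases hr <;> simp_all

-- A's counting pass is positive iff some element has the prefix
lemma count_pos_iff (p : String → Bool) (xs : List String) : ∀ acc : Int, 0 ≤ acc →
    ((xs.foldl (fun acc name => if p name then acc + 1 else acc) acc > 0) ↔ (acc > 0 ∨ xs.any p = true)) := by
  induction xs with
  | nil => intro acc _; simp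
  | cons name rest ih =>
    intro acc hacc
    simp only [List.foldl_cons, List.any_cons]
    by_cases h : p name
    · rw [if_pos h, ih (acc + 1) (by omega)]
      simp [h]; omega
    · rw [if_neg h, ih acc hacc]
      simp [h]

-- ===== VERDICT (by name: the statement is the Claim_ definition above) =====
theorem infer_group_name_spec : Claim_equal_infer_group_name := by
  intro xs _
  unfold Spec_infer_group_name infer_group_name infer_group_name_alt
  rw [inferGroupLoop_eq]
  simp only [Bool.false_or]
  rcases xs with _ | ⟨n, rest⟩
  · simp
  · set ys := n :: rest with hys
    rw [if_neg (by simp [hys])]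
    have hl := count_pos_iff (fun n => PySem.Str.startswith n "l_") ys 0 le_rfl
    have hr := count_pos_iff (fun n => PySem.Str.startswith n "r_") ys 0 le_rfl
    simp only [show ¬((0:Int) > 0) by omega, false_or] at hl hr
    by_cases hA : ys.any (fun n => PySem.Str.startswith n "l_") <;>
      by_cases hB : ys.any (fun n => PySem.Str.startswith n "r_") <;>
      simp only [gt_iff_lt] at hl hr ⊢ <;>
      simp only [hl, hr, hA, hB] <;>
      split_ifs <;> simp_all
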